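-- pv_equiv track=rewrite | github.com/Jesse3141/bio_hackathon | extract_signal_3samples.py | get_signal_boundaries
-- ===== SOURCE A (Python) =====
-- def get_signal_boundaries(moves, stride, signal_start=0):
--     """Convert move table to signal sample boundaries for each base."""
--     boundaries = []
--     current_sample = signal_start
--
--     for i, move in enumerate(moves):
--         if move == 1:
--             start = current_sample
--             j = i + 1
--             while j < len(moves) and moves[j] == 0:
--                 j += 1
--             end = signal_start + j * stride
--             boundaries.append((start, end))
--         current_sample += stride
--
--     return boundaries
-- ===== SOURCE B (Python) =====
-- def get_signal_boundaries(moves, stride, signal_start=0):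
--     """Convert move table to signal sample boundaries for each base."""
--     nz = [i for i in range(len(moves)) if moves[i] != 0] + [len(moves)]
--     return [(signal_start + i * stride, signal_start + n * stride)
--             for i, n in zip(nz, nz[1:]) if moves[i] == 1]
-- ===== Notes on version B (the rewrite author's own statement) =====
-- stated objective: alternative
-- what changed: Builds the list of nonzero move indices once (with a len(moves) sentinel) and pairs consecutive entries to get each segment's end, instead of A's nested forward re-scan over zeros after every 1.
import Mathlib
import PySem

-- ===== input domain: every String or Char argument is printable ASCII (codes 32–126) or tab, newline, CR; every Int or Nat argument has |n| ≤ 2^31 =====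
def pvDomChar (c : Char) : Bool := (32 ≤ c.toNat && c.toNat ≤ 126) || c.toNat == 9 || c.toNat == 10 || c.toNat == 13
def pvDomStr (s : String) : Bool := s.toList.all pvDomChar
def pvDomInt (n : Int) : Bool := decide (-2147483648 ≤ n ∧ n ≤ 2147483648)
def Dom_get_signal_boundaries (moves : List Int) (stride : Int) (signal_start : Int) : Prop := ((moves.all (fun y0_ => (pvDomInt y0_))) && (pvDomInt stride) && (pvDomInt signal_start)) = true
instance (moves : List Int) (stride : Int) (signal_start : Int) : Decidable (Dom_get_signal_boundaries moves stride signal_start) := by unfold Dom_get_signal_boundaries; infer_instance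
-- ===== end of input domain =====

-- B replaces A's inner forward scan over zeros by one precomputed list of nonzero
-- indices (with a sentinel), pairing consecutive entries (objective: alternative algorithm).

-- ===== PORT A =====
-- the inner 'while j < len(moves) and moves[j] == 0: j += 1' of A
def pvScanA (moves : List Int) (j : Nat) : Nat :=
  if j < moves.length then
    if moves.getD j 0 == 0 then pvScanA moves (j + 1) else j
  else j
termination_by moves.length - j

-- the 'for i, move in enumerate(moves)' loop of A, as recursion on the index i
def pvLoopA (moves : List Int) (stride : Int) (signal_start : Int)
    (i : Nat) (current_sample : Int) (boundaries : List (Int × Int)) : List (Int × Int) :=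
  if i < moves.length then
    let boundaries' :=
      if moves.getD i 0 == 1 then
        boundaries ++ [(current_sample, signal_start + (pvScanA moves (i + 1) : Int) * stride)]
      else boundaries
    pvLoopA moves stride signal_start (i + 1) (current_sample + stride) boundaries'
  else boundaries
termination_by moves.length - i

def get_signal_boundaries (moves : List Int) (stride : Int) (signal_start : Int) : List (Int × Int) :=
  pvLoopA moves stride signal_start 0 signal_start []

-- ===== PORT B =====
def get_signal_boundaries_alt (moves : List Int) (stride : Int) (signal_start : Int) : List (Int × Int) :=
  let nz := (List.range moves.length).filter (fun i => moves.getD i 0 != 0) ++ [moves.length]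
  (nz.zip nz.tail).filterMap fun p =>
    if moves.getD p.1 0 == 1 then
      some (signal_start + (p.1 : Int) * stride, signal_start + (p.2 : Int) * stride)
    else none

-- ===== PRECONDITION & SPEC =====
def Spec_get_signal_boundaries (moves : List Int) (stride : Int) (signal_start : Int) (out : List (Int × Int)) : Prop := out = get_signal_boundaries_alt moves stride signal_start
instance (moves : List Int) (stride : Int) (signal_start : Int) (out : List (Int × Int)) : Decidable (Spec_get_signal_boundaries moves stride signal_start out) := by unfold Spec_get_signal_boundaries; infer_instance

-- ===== CLAIM (what is proved, stated in full; the proofs are below) =====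
def Claim_equal_get_signal_boundaries : Prop := ∀ (moves : List Int) (stride : Int) (signal_start : Int), Dom_get_signal_boundaries moves stride signal_start → Spec_get_signal_boundaries moves stride signal_start (get_signal_boundaries moves stride signal_start)

-- ===== LEMMAS AND PROOFS =====

-- nonzero indices of moves from position i on
def pvNz (moves : List Int) (i : Nat) : List Nat :=
  (List.range' i (moves.length - i)).filter (fun j => moves.getD j 0 != 0)

-- B's pairing applied to a list of indices (plus the sentinel)
def pvOut (moves : List Int) (stride : Int) (signal_start : Int) (l : List Nat) : List (Int × Int) :=
  ((l ++ [moves.length]).zip ((l ++ [moves.length]).tail)).filterMap fun p =>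
    if moves.getD p.1 0 == 1 then
      some (signal_start + (p.1 : Int) * stride, signal_start + (p.2 : Int) * stride)
    else none

lemma pvNz_step1 (moves : List Int) (i : Nat) (h : i < moves.length)
    (hnz : moves.getD i 0 ≠ 0) : pvNz moves i = i :: pvNz moves (i + 1) := by
  unfold pvNz
  have hl : moves.length - i = (moves.length - (i + 1)) + 1 := by omega
  rw [hl, List.range'_succ, List.filter_cons]
  simp only [List.getD] at hnz
  simp [hnz]

lemma pvNz_step0 (moves : List Int) (i : Nat) (h : i < moves.length)
    (hz : moves.getD i 0 = 0) : pvNz moves i = pvNz moves (i + 1) := by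
  unfold pvNz
  have hl : moves.length - i = (moves.length - (i + 1)) + 1 := by omega
  rw [hl, List.range'_succ, List.filter_cons]
  simp only [List.getD] at hz
  simp [hz]

lemma pvNz_end (moves : List Int) (i : Nat) (h : ¬ i < moves.length) : pvNz moves i = [] := by
  unfold pvNz
  have : moves.length - i = 0 := by omega
  simp [this]

lemma pvScanA_eq (moves : List Int) (i : Nat) (h : i ≤ moves.length) :
    pvScanA moves i = (pvNz moves i).headD moves.length := by
  by_cases hi : i < moves.length
  · rw [pvScanA, if_pos hi]
    by_cases h0 : moves.getD i 0 == 0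
    · rw [if_pos h0, pvNz_step0 moves i hi (by simpa using h0)]
      exact pvScanA_eq moves (i + 1) (by omega)
    · rw [if_neg h0, pvNz_step1 moves i hi (by simpa using h0)]
      simp
  · rw [pvScanA, if_neg hi, pvNz_end moves i hi]
    simp
    omega
termination_by moves.length - i

lemma pvOut_cons (moves : List Int) (stride signal_start : Int) (a : Nat) (l : List Nat) :
    pvOut moves stride signal_start (a :: l) =
      (if moves.getD a 0 == 1 then
        [(signal_start + (a : Int) * stride,
          signal_start + ((l.headD moves.length : Nat) : Int) * stride)]
       else []) ++ pvOut moves stride signal_start l := by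
  cases l with
  | nil => unfold pvOut; simp [List.filterMap_cons]; split_ifs <;> simp
  | cons b t => unfold pvOut; simp [List.filterMap_cons]; split_ifs <;> simp

lemma pvLoopA_eq (moves : List Int) (stride signal_start : Int) (i : Nat) (_h : i ≤ moves.length)
    (bs : List (Int × Int)) :
    pvLoopA moves stride signal_start i (signal_start + (i : Int) * stride) bs =
      bs ++ pvOut moves stride signal_start (pvNz moves i) := by
  by_cases hi : i < moves.length
  · rw [pvLoopA, if_pos hi]
    have hstep : signal_start + (i : Int) * stride + stride
        = signal_start + ((i + 1 : Nat) : Int) * stride := by push_cast; ring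
    rw [hstep]
    rw [pvLoopA_eq moves stride signal_start (i + 1) (by omega)]
    by_cases h1 : moves.getD i 0 == 1
    · have hne : moves.getD i 0 ≠ 0 := by
        simp only [beq_iff_eq] at h1; rw [h1]; decide
      rw [if_pos h1, pvNz_step1 moves i hi hne]
      rw [pvScanA_eq moves (i + 1) (by omega)]
      rw [pvOut_cons, if_pos h1]
      simp
    · rw [if_neg h1]
      by_cases hz : moves.getD i 0 = 0
      · rw [pvNz_step0 moves i hi hz]
      · rw [pvNz_step1 moves i hi hz]
        rw [pvOut_cons, if_neg h1]
        simp
  · rw [pvLoopA, if_neg hi, pvNz_end moves i hi]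
    unfold pvOut
    simp
termination_by moves.length - i

-- ===== VERDICT (by name: the statement is the Claim_ definition above) =====
theorem get_signal_boundaries_spec : Claim_equal_get_signal_boundaries := by
  intro moves stride signal_start _
  unfold Spec_get_signal_boundaries get_signal_boundaries get_signal_boundaries_alt
  have h := pvLoopA_eq moves stride signal_start 0 (by omega) []
  simp only [Nat.cast_zero, zero_mul, add_zero, List.nil_append] at h
  rw [h]
  unfold pvOut pvNz
  simp [List.range_eq_range']
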